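-- pv_equiv track=rewrite | github.com/jviteMx/AMDCapstone | AidansDynamicDash/analysis.py | get_gpu_servers
-- ===== SOURCE A (Python) =====
-- def get_gpu_servers(ls_of_tuples):
--     gpu_servers = []
--     for i in range(len(ls_of_tuples)):
--         if ls_of_tuples[i][0] == "HardWare-ID":
--             gpu_servers.append(ls_of_tuples[i][1])
--     flattened_gpu_servers = []
--     ls_elements = [item for item in gpu_servers if isinstance(item, list)]
--     non_ls_elements = [item for item in gpu_servers if not isinstance(item, list)]
--     made_list = [[item] for item in non_ls_elements]
--     for item in made_list:
--         ls_elements.append(item)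
--     gpu_servers = ls_elements
--     for ls in gpu_servers:
--         for item in ls:
--             flattened_gpu_servers.append(item)
--     return flattened_gpu_servers
-- ===== SOURCE B (Python) =====
-- def get_gpu_servers(ls_of_tuples):
--     # Single nested comprehension: select "HardWare-ID" values and flatten in one pass.
--     return [s for k, vs in ls_of_tuples if k == "HardWare-ID" for s in vs]
-- ===== Notes on version B (the rewrite author's own statement) =====
-- stated objective: simpler
-- what changed: Replaces A's five-pass pipeline (index loop, two isinstance partitions, re-wrapping, nested flatten loop) with a single nested comprehension that selects and flattens in one pass; since every value is a list of strings, the isinstance partition is vacuous and order is preserved.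
import Mathlib
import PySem

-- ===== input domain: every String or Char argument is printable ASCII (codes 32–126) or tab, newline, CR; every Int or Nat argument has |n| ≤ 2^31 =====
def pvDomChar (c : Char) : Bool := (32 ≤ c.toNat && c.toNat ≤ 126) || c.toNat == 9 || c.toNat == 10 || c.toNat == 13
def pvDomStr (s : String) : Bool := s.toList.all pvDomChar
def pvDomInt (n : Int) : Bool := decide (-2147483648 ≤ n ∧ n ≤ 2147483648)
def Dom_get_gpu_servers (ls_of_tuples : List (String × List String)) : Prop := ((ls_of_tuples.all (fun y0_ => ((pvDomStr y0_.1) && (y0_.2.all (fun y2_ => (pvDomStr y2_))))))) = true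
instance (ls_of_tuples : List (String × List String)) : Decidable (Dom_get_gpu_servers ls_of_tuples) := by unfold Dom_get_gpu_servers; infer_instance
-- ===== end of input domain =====

-- B replaces A's five-pass pipeline with one nested comprehension (select + flatten in one pass); objective: simpler.
-- ===== PORT A =====
-- Literal port of A. Note on typing: at the declared type every selected value is a
-- list (List String), so Python's `isinstance(item, list)` is always True here: the
-- first filter keeps everything, `non_ls_elements` is always empty, and the
-- `made_list` append loop is a no-op (its body is untypable and unreachable at this type).
def get_gpu_servers (ls_of_tuples : List (String × List String)) : List String :=
  let gpu_servers : List (List String) :=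
    (PySem.List.pyRange 0 ls_of_tuples.length 1).foldl
      (fun acc i =>
        let t := PySem.List.pyGetD ls_of_tuples i ("", [])
        if t.1 = "HardWare-ID" then acc ++ [t.2] else acc) []
  let ls_elements := gpu_servers.filter (fun _ => true)        -- isinstance(item, list): always True
  let non_ls_elements : List String := []                      -- isinstance never False at this type
  let made_list := non_ls_elements.map (fun item => [item])
  let gpu_servers2 := made_list.foldl (fun acc item => acc ++ [item]) ls_elements
  gpu_servers2.foldl (fun flattened ls => ls.foldl (fun a item => a ++ [item]) flattened) []

-- ===== PORT B =====
-- Literal port of B's single nested comprehension.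
def get_gpu_servers_alt (ls_of_tuples : List (String × List String)) : List String :=
  ls_of_tuples.flatMap (fun t => if t.1 = "HardWare-ID" then t.2 else [])

-- ===== PRECONDITION & SPEC =====
def Spec_get_gpu_servers (ls_of_tuples : List (String × List String)) (out : List String) : Prop := out = get_gpu_servers_alt ls_of_tuples
instance (ls_of_tuples : List (String × List String)) (out : List String) : Decidable (Spec_get_gpu_servers ls_of_tuples out) := by unfold Spec_get_gpu_servers; infer_instance

-- ===== CLAIM (what is proved, stated in full; the proofs are below) =====
def Claim_equal_get_gpu_servers : Prop := ∀ (ls_of_tuples : List (String × List String)), Dom_get_gpu_servers ls_of_tuples → Spec_get_gpu_servers ls_of_tuples (get_gpu_servers ls_of_tuples)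

-- ===== LEMMAS AND PROOFS =====

-- ===== VERDICT (by name: the statement is the Claim_ definition above) =====
-- inner flatten loop: appending the elements of ls one by one is acc ++ ls
theorem pvFoldlSnoc (ls acc : List String) :
    ls.foldl (fun a item => a ++ [item]) acc = acc ++ ls := by
  induction ls generalizing acc with
  | nil => simp
  | cons x xs ih => simp [List.foldl, ih]

-- outer flatten loop equals init ++ flatten
theorem pvFoldlFlatten (gs : List (List String)) (init : List String) :
    gs.foldl (fun flattened ls => ls.foldl (fun a item => a ++ [item]) flattened) init
      = init ++ gs.flatten := by
  induction gs generalizing init with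
  | nil => simp
  | cons g gss ih => rw [List.foldl_cons, pvFoldlSnoc, ih]; simp

-- the selection loop of A equals acc ++ filter-map
theorem pvSelEq (l : List (String × List String)) (acc : List (List String)) :
    l.foldl (fun acc t => if t.1 = "HardWare-ID" then acc ++ [t.2] else acc) acc
      = acc ++ (l.filter (fun t => decide (t.1 = "HardWare-ID"))).map (·.2) := by
  induction l generalizing acc with
  | nil => simp
  | cons t ts ih =>
    by_cases h : t.1 = "HardWare-ID" <;>
      simp [List.foldl_cons, h, ih]

-- flattening the selected lists equals B's flatMap
theorem pvFlattenSel (l : List (String × List String)) :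
    ((l.filter (fun t => decide (t.1 = "HardWare-ID"))).map (·.2)).flatten
      = l.flatMap (fun t => if t.1 = "HardWare-ID" then t.2 else []) := by
  induction l with
  | nil => simp
  | cons t ts ih =>
    by_cases h : t.1 = "HardWare-ID" <;>
      simp [List.flatMap_cons, h, ih]

theorem get_gpu_servers_spec : Claim_equal_get_gpu_servers := by
  intro l _
  unfold Spec_get_gpu_servers get_gpu_servers get_gpu_servers_alt
  simp only []
  rw [PySem.List.foldl_pyRange_zero_pyGetD' l ("", [])
        (fun acc t => if t.1 = "HardWare-ID" then acc ++ [t.2] else acc) []]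
  simp only [List.filter_true, List.map_nil, List.foldl_nil]
  rw [pvSelEq, pvFoldlFlatten]
  simp only [List.nil_append]
  rw [pvFlattenSel]
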